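-- pv_equiv track=rewrite | github.com/Lyokoigawa/42-py_mod_06 | ex0/stream_processor.py | process
-- ===== SOURCE A (Python) =====
-- from typing import Any, List
--
-- def process(data: Any) -> str:
--     index = 0
--     w_count = 0
--     w_found = False
--     while index < len(data):
--         if data[index] != ' ' and data[index] != '  ':
--             w_found = True
--         else:
--             w_found = False
--             w_count += 1
--         index += 1
--     if w_found:
--         w_count += 1
--     return f"Processed text: {index} characters, {w_count} words"
-- ===== SOURCE B (Python) =====
-- def process(data):
--     # Splitting on ' ' yields one piece per gap: A's word count equals the
--     # number of pieces, minus one when the final piece is empty (text empty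
--     # or ending in a space).  A's '  ' comparison is vacuous per character.
--     parts = data.split(' ')
--     words = len(parts) - (1 if parts[-1] == '' else 0)
--     return f"Processed text: {len(data)} characters, {words} words"
-- ===== Notes on version B (the rewrite author's own statement) =====
-- stated objective: simpler
-- what changed: Replaces the index-driven scan with its running w_found flag by splitting the text on the space character: the word count is the number of split pieces minus one when the last piece is empty, and the character count is len(data).
import Mathlib
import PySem

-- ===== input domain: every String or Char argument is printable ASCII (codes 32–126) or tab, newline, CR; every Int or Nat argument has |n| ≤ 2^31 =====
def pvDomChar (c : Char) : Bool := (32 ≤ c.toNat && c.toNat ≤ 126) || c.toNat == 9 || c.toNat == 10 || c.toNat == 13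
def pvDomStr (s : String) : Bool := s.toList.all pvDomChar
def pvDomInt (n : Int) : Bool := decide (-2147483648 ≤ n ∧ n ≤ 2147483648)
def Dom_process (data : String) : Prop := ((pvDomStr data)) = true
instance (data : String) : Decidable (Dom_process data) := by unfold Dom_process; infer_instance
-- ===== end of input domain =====

-- B replaces A's index-driven scan with its running w_found flag by split-on-' ':
-- word count = number of split pieces minus one when the last piece is empty; char count = len(data). (objective: simpler)


-- ===== PORT A =====
-- the while loop: state (index, w_count, w_found); data[index] is a 1-char string,
-- compared (as in A) against both ' ' and '  '
def processLoop : List Char → Int → Int → Bool → Int × Int × Bool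
  | [], index, w_count, w_found => (index, w_count, w_found)
  | c :: rest, index, w_count, _ =>
      if String.ofList [c] ≠ " " ∧ String.ofList [c] ≠ "  " then
        processLoop rest (index + 1) w_count true
      else
        processLoop rest (index + 1) (w_count + 1) false

def process (data : String) : String :=
  let r := processLoop data.toList 0 0 false
  let w_count := if r.2.2 then r.2.1 + 1 else r.2.1
  "Processed text: " ++ PySem.Int.toStr r.1 ++ " characters, " ++ PySem.Int.toStr w_count ++ " words"

-- ===== PORT B =====
def process_alt (data : String) : String :=
  let parts := (PySem.Str.split? data " ").getD []
  let words : Int := (parts.length : Int) - (if PySem.List.pyGet? parts (-1) = some "" then 1 else 0)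
  "Processed text: " ++ PySem.Int.toStr (PySem.Str.len data) ++ " characters, " ++ PySem.Int.toStr words ++ " words"

-- ===== PRECONDITION & SPEC =====
def Spec_process (data : String) (out : String) : Prop := out = process_alt data
instance (data : String) (out : String) : Decidable (Spec_process data out) := by unfold Spec_process; infer_instance

-- ===== CLAIM (what is proved, stated in full; the proofs are below) =====
def Claim_equal_process : Prop := ∀ (data : String), Dom_process data → Spec_process data (process data)

-- ===== LEMMAS AND PROOFS =====
-- characterisation of A's loop
def cntSp : List Char → Int
  | [] => 0
  | c :: r => (if c = ' ' then 1 else 0) + cntSp r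

def lastFlag : List Char → Bool → Bool
  | [], f => f
  | c :: r, _ => lastFlag r (decide (c ≠ ' '))

theorem cond_iff (c : Char) : (String.ofList [c] ≠ " " ∧ String.ofList [c] ≠ "  ") ↔ c ≠ ' ' := by
  simp [String.ext_iff, String.toList_ofList]

theorem loop_spec : ∀ (l : List Char) (i cnt : Int) (f : Bool),
    processLoop l i cnt f = (i + l.length, cnt + cntSp l, lastFlag l f)
  | [], i, cnt, f => by simp [processLoop, cntSp, lastFlag]
  | c :: r, i, cnt, f => by
      by_cases h : c = ' '
      · rw [processLoop, if_neg (by rw [cond_iff]; simp [h]), loop_spec r]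
        simp [cntSp, lastFlag, h]; omega
      · rw [processLoop, if_pos (by rw [cond_iff]; exact h), loop_spec r]
        simp [cntSp, lastFlag, h]; omega

theorem lastFlag_getLast? : ∀ (l : List Char) (f : Bool),
    lastFlag l f = (match l.getLast? with | none => f | some c => decide (c ≠ ' '))
  | [], f => rfl
  | [c], f => by simp [lastFlag]
  | c :: d :: r, f => by
      rw [lastFlag, lastFlag_getLast? (d :: r), List.getLast?_cons_cons]
      cases h2 : (d :: r).getLast? with
      | none => exact absurd (List.getLast?_eq_none_iff.mp h2) (by simp)
      | some x => rfl

-- characterisation of splitOn on the single-character separator ' '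
def mySplit : List Char → List Char → List (List Char)
  | [], cur => [cur.reverse]
  | c :: rest, cur => if c = ' ' then cur.reverse :: mySplit rest [] else mySplit rest (c :: cur)

theorem go_eq : ∀ (fuel : Nat) (l cur : List Char) (acc : List (List Char)), l.length < fuel →
    PySem.Chars.splitOn.go [' '] fuel l cur acc = acc.reverse ++ mySplit l cur
  | 0, l, cur, acc, h => by omega
  | fuel + 1, [], cur, acc, _ => by
      simp [PySem.Chars.splitOn.go, mySplit]
  | fuel + 1, c :: rest, cur, acc, h => by
      rw [PySem.Chars.splitOn.go]
      by_cases hc : c = ' '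
      · rw [if_pos (by simp [hc, List.isPrefixOf])]
        rw [go_eq fuel _ _ _ (by simpa using Nat.lt_of_succ_lt_succ h)]
        simp [mySplit, hc]
      · rw [if_neg (by simp [List.isPrefixOf, Ne.symm hc])]
        rw [go_eq fuel _ _ _ (by simpa using Nat.lt_of_succ_lt_succ h)]
        simp [mySplit, hc]

theorem splitOn_eq (l : List Char) : PySem.Chars.splitOn l [' '] = mySplit l [] := by
  rw [PySem.Chars.splitOn, go_eq (l.length + 1) l [] [] (by omega)]
  simp

theorem mySplit_length : ∀ (l cur : List Char), ((mySplit l cur).length : Int) = cntSp l + 1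
  | [], cur => by simp [mySplit, cntSp]
  | c :: r, cur => by
      by_cases h : c = ' '
      · simp [mySplit, h, cntSp, mySplit_length r]; ring
      · simp [mySplit, h, cntSp, mySplit_length r]

def lastPiece : List Char → List Char → List Char
  | [], cur => cur.reverse
  | c :: rest, cur => if c = ' ' then lastPiece rest [] else lastPiece rest (c :: cur)

theorem mySplit_getLast? : ∀ (l cur : List Char),
    (mySplit l cur).getLast? = some (lastPiece l cur)
  | [], cur => by simp [mySplit, lastPiece]
  | c :: r, cur => by
      by_cases h : c = ' '
      · have := mySplit_getLast? r ([] : List Char)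
        simp [mySplit, h, lastPiece]
        rw [List.getLast?_cons]
        simp [this]
      · simp [mySplit, h, lastPiece, mySplit_getLast? r]

theorem lastPiece_empty_iff : ∀ (l cur : List Char),
    (lastPiece l cur = [] ↔ (match l.getLast? with | none => cur = [] | some c => c = ' '))
  | [], cur => by simp [lastPiece]
  | [c], cur => by
      by_cases h : c = ' ' <;> simp [lastPiece, h]
  | c :: d :: r, cur => by
      rw [List.getLast?_cons_cons]
      by_cases h : c = ' '
      · rw [show lastPiece (c :: d :: r) cur = lastPiece (d :: r) [] by simp [lastPiece, h]]
        exact lastPiece_empty_iff (d :: r) []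
      · rw [show lastPiece (c :: d :: r) cur = lastPiece (d :: r) (c :: cur) by simp [lastPiece, h]]
        rw [lastPiece_empty_iff (d :: r) (c :: cur)]
        cases h2 : (d :: r).getLast? with
        | none => exact absurd (List.getLast?_eq_none_iff.mp h2) (by simp)
        | some x => rfl

theorem split_eq (data : String) :
    (PySem.Str.split? data " ").getD [] = (mySplit data.toList []).map String.ofList := by
  rw [PySem.Str.split?, PySem.Chars.split?,
    if_neg (by simp), show (" " : String).toList = [' '] from rfl, splitOn_eq]
  rfl

theorem sof_empty_iff (l : List Char) : (String.ofList l = "") ↔ l = [] := by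
  constructor
  · intro h; have := congrArg String.toList h; simpa using this
  · intro h; rw [h]

-- ===== VERDICT (by name: the statement is the Claim_ definition above) =====
theorem process_spec : Claim_equal_process := by
  intro data _
  show process data = process_alt data
  unfold process process_alt
  simp only [loop_spec, lastFlag_getLast?, split_eq, List.length_map, zero_add,
    PySem.Str.len_eq]
  rw [PySem.List.pyGet?_neg_one, List.getLast?_map, mySplit_getLast?]
  simp only [Option.map_some, Option.some_inj]
  have hlen := mySplit_length data.toList []
  have hempty := lastPiece_empty_iff data.toList []
  cases h : data.toList.getLast? with
  | none =>
      have hnil : data.toList = [] := List.getLast?_eq_none_iff.mp h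
      rw [if_neg (by simp), if_pos (by rw [sof_empty_iff, hnil]; simp [lastPiece]), hnil]
      norm_num [cntSp, mySplit]
  | some c =>
      rw [h] at hempty
      by_cases hc : c = ' '
      · subst hc
        rw [if_neg (by simp)]
        rw [if_pos (by rw [sof_empty_iff]; exact hempty.mpr rfl)]
        rw [show ((mySplit data.toList []).length : Int) - 1 = cntSp data.toList by omega]
      · rw [if_pos (by simp [hc])]
        rw [if_neg (by rw [sof_empty_iff]; intro hx; exact hc (hempty.mp hx))]
        simp only [sub_zero]
        rw [hlen]
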